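-- pv_equiv track=rewrite | github.com/GaboHueck/textolab-es | textolab/markov_babbler.py | replace_before_point
-- ===== SOURCE A (Python) =====
-- def replace_before_point(tup: tuple) -> tuple:
--     new_tup = []
--     passed_point_flag = False
--     for p in list(tup):
--         if p == '.':
--             passed_point_flag = True
--             new_tup.append(p)
--         else:
--             if passed_point_flag:
--                 new_tup.append(p)
--             else:
--                 new_tup.append(None)       #Anything before the point is turned into None
--     out_tup = tuple(new_tup)
--     return out_tup
-- ===== SOURCE B (Python) =====
-- def replace_before_point(tup: tuple) -> tuple:
--     t = list(tup)
--     try: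
--         i = t.index('.')
--     except ValueError:
--         return (None,) * len(t)
--     return (None,) * i + tuple(t[i:])
-- ===== Notes on version B (the rewrite author's own statement) =====
-- stated objective: simpler
-- what changed: Locate the first '.' with list.index once, then build the result as a None-prefix of that length plus the verbatim suffix, instead of a per-element loop carrying a passed-the-point flag.
import Mathlib
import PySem

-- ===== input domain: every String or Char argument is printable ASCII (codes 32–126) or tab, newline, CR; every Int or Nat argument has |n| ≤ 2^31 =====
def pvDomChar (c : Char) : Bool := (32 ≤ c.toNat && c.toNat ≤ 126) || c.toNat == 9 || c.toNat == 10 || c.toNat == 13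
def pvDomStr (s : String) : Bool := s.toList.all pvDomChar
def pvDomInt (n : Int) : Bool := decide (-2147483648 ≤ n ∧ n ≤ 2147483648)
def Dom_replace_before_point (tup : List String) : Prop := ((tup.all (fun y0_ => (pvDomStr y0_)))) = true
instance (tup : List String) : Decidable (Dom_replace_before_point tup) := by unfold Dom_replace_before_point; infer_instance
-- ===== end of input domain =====

-- ===== PORT A =====
-- flag-carrying loop: append some p after the first '.', none before it
def replace_before_point (tup : List String) : List (Option String) :=
  (tup.foldl
    (fun (st : List (Option String) × Bool) p =>
      if p == "." then (st.1 ++ [some p], true)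
      else if st.2 then (st.1 ++ [some p], st.2)
      else (st.1 ++ [none], st.2))
    ([], false)).1

-- ===== PORT B =====
-- B: find the first '.' once; None-prefix of that length ++ verbatim suffix
def replace_before_point_alt (tup : List String) : List (Option String) :=
  match PySem.List.index? tup "." with
  | none => List.replicate tup.length none
  | some i => List.replicate i none ++ (tup.drop i).map some

-- ===== PRECONDITION & SPEC =====
def Spec_replace_before_point (tup : List String) (out : List (Option String)) : Prop := out = replace_before_point_alt tup
instance (tup : List String) (out : List (Option String)) : Decidable (Spec_replace_before_point tup out) := by unfold Spec_replace_before_point; infer_instance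

-- ===== CLAIM (what is proved, stated in full; the proofs are below) =====
def Claim_equal_replace_before_point : Prop := ∀ (tup : List String), Dom_replace_before_point tup → Spec_replace_before_point tup (replace_before_point tup)

-- ===== LEMMAS AND PROOFS =====
def pvStep (st : List (Option String) × Bool) (p : String) : List (Option String) × Bool :=
  if p == "." then (st.1 ++ [some p], true)
  else if st.2 then (st.1 ++ [some p], st.2)
  else (st.1 ++ [none], st.2)

theorem pvRun_true (tup : List String) (acc : List (Option String)) :
    (tup.foldl pvStep (acc, true)).1 = acc ++ tup.map some := by
  induction tup generalizing acc with
  | nil => simp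
  | cons h t ih =>
    simp only [List.foldl_cons, pvStep]
    by_cases hd : h == "." <;> simp [hd, ih, List.append_assoc]

theorem pvRun_false (tup : List String) (acc : List (Option String)) :
    (tup.foldl pvStep (acc, false)).1 = acc ++ replace_before_point_alt tup := by
  induction tup generalizing acc with
  | nil => simp [replace_before_point_alt, PySem.List.index?]
  | cons h t ih =>
    simp only [List.foldl_cons, pvStep]
    by_cases hd : h == "."
    · have hd' : h = "." := by simpa using hd
      rw [hd']
      simp only [replace_before_point_alt, PySem.List.index?_cons_self]
      simp [pvRun_true, List.append_assoc]
    · have hd' : h ≠ "." := by simpa using hd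
      simp only [hd, if_false, Bool.false_eq_true, ih]
      have hidx := PySem.List.index?_cons_of_ne (xs := t) (v := ".") hd'
      simp only [replace_before_point_alt, hidx]
      cases hi : PySem.List.index? t "." with
      | none => simp [List.replicate_succ, List.append_assoc]
      | some i => simp [List.replicate_succ, List.append_assoc]

-- ===== VERDICT (by name: the statement is the Claim_ definition above) =====
theorem replace_before_point_spec : Claim_equal_replace_before_point := by
  intro tup _
  show replace_before_point tup = replace_before_point_alt tup
  simpa using pvRun_false tup []
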